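-- pv_equiv track=rewrite | github.com/ScrollPrize/villa | lasagna/estimate_stream_memory.py | _stream_bytes
-- ===== SOURCE A (Python) =====
-- def _stream_bytes(N: int, sm: int, sw: int, N_ext: int,
--                   lr_winding: bool = False) -> int:
--     """Compute streamed memory for N LR vertices.
--
--     lr_winding=True: winding density integral at LR step (not HR),
--     grad_mag sampled with full 3×3 Jacobian (10 bytes) on CPU.
--     """
--     hr = sm * sw
--     S = sm + 1
--     bytes_diff = 4     # value + 3 partials (d/dx, d/dy, d/dz)
--     bytes_nodiff = 1   # value only
--     bytes_jac = 10     # value + 3×3 Jacobian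
--
--     if lr_winding:
--         # winding_density: LR step, S strip samples, grad_mag with full Jacobian
--         # ext_offset: LR step (already LR), S strip samples, grad_mag with full Jacobian
--         calls = [
--             (hr,            5, bytes_diff),    # fwd: data_s
--             (hr,            1, bytes_nodiff),  # fwd: mask_hr
--             (1,             1, bytes_nodiff),  # fwd: mask_lr
--             (3,             1, bytes_nodiff),  # fwd: conn masks
--             (N_ext,         1, bytes_nodiff),  # fwd: ext intersect
--             (hr,            1, bytes_diff),    # data loss
--             (1,             3, bytes_nodiff),  # normal (nx, ny, gm)
--             (1,             1, bytes_diff),    # pred_dt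
--             (2 * S,         1, bytes_jac),     # winding_density: LR × S, full Jacobian
--             (N_ext * S,     1, bytes_jac),     # ext_offset: LR × S, full Jacobian
--         ]
--     else:
--         calls = [
--             (hr,            5, bytes_diff),    # fwd: data_s
--             (hr,            1, bytes_nodiff),  # fwd: mask_hr
--             (1,             1, bytes_nodiff),  # fwd: mask_lr
--             (3,             1, bytes_nodiff),  # fwd: conn masks
--             (N_ext,         1, bytes_nodiff),  # fwd: ext intersect
--             (hr,            1, bytes_diff),    # data loss
--             (1,             3, bytes_nodiff),  # normal (nx, ny, gm)
--             (1,             1, bytes_diff),    # pred_dt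
--             (2 * hr * S,    1, bytes_nodiff),  # winding_density
--             (N_ext * S,     1, bytes_nodiff),  # ext_offset
--         ]
--     total = 0
--     for factor, n_ch, bpc in calls:
--         total += factor * N * n_ch * bpc
--     return total
-- ===== SOURCE B (Python) =====
-- def _stream_bytes(N: int, sm: int, sw: int, N_ext: int,
--                   lr_winding: bool = False) -> int:
--     """Per-vertex cost as a factored base + branch-dependent tail, times N.
--
--     The eight tensors shared by both modes collapse algebraically to
--     25*hr + N_ext + 11 bytes per vertex; only the final winding/ext_offset
--     tail depends on lr_winding (full-Jacobian 10-byte samples at LR vs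
--     1-byte samples at HR).
--     """
--     hr = sm * sw
--     S = sm + 1
--     per_vertex = 25 * hr + N_ext + 11
--     if lr_winding:
--         per_vertex += (2 + N_ext) * S * 10
--     else:
--         per_vertex += (2 * hr + N_ext) * S
--     return N * per_vertex
-- ===== Notes on version B (the rewrite author's own statement) =====
-- stated objective: simpler
-- what changed: Removed the 10-entry call table and the summation loop: B algebraically collapses the eight branch-independent tensors to a single factored base term 25*hr + N_ext + 11, adds only the lr_winding-dependent tail (2+N_ext)*S*10 vs (2*hr+N_ext)*S, and multiplies by N once at the end instead of inside every term.
import Mathlib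
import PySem

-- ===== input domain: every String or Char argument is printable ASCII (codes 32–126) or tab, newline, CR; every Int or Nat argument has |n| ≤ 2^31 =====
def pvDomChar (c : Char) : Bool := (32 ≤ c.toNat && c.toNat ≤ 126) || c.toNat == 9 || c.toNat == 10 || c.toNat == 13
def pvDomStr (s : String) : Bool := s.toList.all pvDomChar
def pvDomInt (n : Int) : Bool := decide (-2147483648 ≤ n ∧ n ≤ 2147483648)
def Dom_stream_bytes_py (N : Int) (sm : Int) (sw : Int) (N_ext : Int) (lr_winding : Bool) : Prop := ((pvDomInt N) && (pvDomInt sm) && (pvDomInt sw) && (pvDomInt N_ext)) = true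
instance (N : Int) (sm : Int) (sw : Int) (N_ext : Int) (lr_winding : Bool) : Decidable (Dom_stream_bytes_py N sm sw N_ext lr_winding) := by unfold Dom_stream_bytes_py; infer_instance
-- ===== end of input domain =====

-- B collapses the fixed call table into a factored base + lr_winding tail (objective: simpler).
-- ===== PORT A =====
def stream_bytes_py (N : Int) (sm : Int) (sw : Int) (N_ext : Int) (lr_winding : Bool) : Int :=
  let hr := sm * sw
  let S := sm + 1
  let bytes_diff : Int := 4
  let bytes_nodiff : Int := 1
  let bytes_jac : Int := 10
  let calls : List (Int × Int × Int) :=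
    if lr_winding then
      [(hr, 5, bytes_diff), (hr, 1, bytes_nodiff), (1, 1, bytes_nodiff),
       (3, 1, bytes_nodiff), (N_ext, 1, bytes_nodiff), (hr, 1, bytes_diff),
       (1, 3, bytes_nodiff), (1, 1, bytes_diff), (2 * S, 1, bytes_jac),
       (N_ext * S, 1, bytes_jac)]
    else
      [(hr, 5, bytes_diff), (hr, 1, bytes_nodiff), (1, 1, bytes_nodiff),
       (3, 1, bytes_nodiff), (N_ext, 1, bytes_nodiff), (hr, 1, bytes_diff),
       (1, 3, bytes_nodiff), (1, 1, bytes_diff), (2 * hr * S, 1, bytes_nodiff),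
       (N_ext * S, 1, bytes_nodiff)]
  calls.foldl (fun total c => total + c.1 * N * c.2.1 * c.2.2) 0

-- ===== PORT B =====
-- B: factored base (branch-independent tensors collapsed) + lr_winding tail, times N once.
def stream_bytes_py_alt (N : Int) (sm : Int) (sw : Int) (N_ext : Int) (lr_winding : Bool) : Int :=
  let hr := sm * sw
  let S := sm + 1
  let base : Int := 25 * hr + N_ext + 11
  let per_vertex : Int :=
    if lr_winding then base + (2 + N_ext) * S * 10
    else base + (2 * hr + N_ext) * S
  N * per_vertex

-- ===== PRECONDITION & SPEC =====
def Spec_stream_bytes_py (N : Int) (sm : Int) (sw : Int) (N_ext : Int) (lr_winding : Bool) (out : Int) : Prop := out = stream_bytes_py_alt N sm sw N_ext lr_winding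
instance (N : Int) (sm : Int) (sw : Int) (N_ext : Int) (lr_winding : Bool) (out : Int) : Decidable (Spec_stream_bytes_py N sm sw N_ext lr_winding out) := by unfold Spec_stream_bytes_py; infer_instance

-- ===== CLAIM (what is proved, stated in full; the proofs are below) =====
def Claim_equal_stream_bytes_py : Prop := ∀ (N : Int) (sm : Int) (sw : Int) (N_ext : Int) (lr_winding : Bool), Dom_stream_bytes_py N sm sw N_ext lr_winding → Spec_stream_bytes_py N sm sw N_ext lr_winding (stream_bytes_py N sm sw N_ext lr_winding)

-- ===== LEMMAS AND PROOFS =====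

-- ===== VERDICT (by name: the statement is the Claim_ definition above) =====
theorem stream_bytes_py_spec : Claim_equal_stream_bytes_py := by
  intro N sm sw N_ext lr_winding _
  unfold Spec_stream_bytes_py stream_bytes_py stream_bytes_py_alt
  cases lr_winding <;> simp [List.foldl] <;> ring
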